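-- pv_equiv track=rewrite | github.com/GundalaNikhil/DSA | dsa-problems/NumberTheory/solutions/python/NUM-006-distinct-prime-factors-prefix.py | build_prefix_distinct
-- ===== SOURCE A (Python) =====
-- def build_prefix_distinct(N: int):
--     f = [0] * (N + 1)
--
--     # Modified Sieve
--     for i in range(2, N + 1):
--         if f[i] == 0:  # i is prime
--             for j in range(i, N + 1, i):
--                 f[j] += 1
--
--     pref = [0] * (N + 1)
--     for i in range(1, N + 1):
--         pref[i] = pref[i-1] + f[i]
--
--     return pref
-- ===== SOURCE B (Python) =====
-- def build_prefix_distinct(N: int):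
--     size = N + 1
--     # smallest-prime-factor sieve: spf[j] = smallest prime dividing j (0 for j < 2)
--     spf = [0] * size
--     for i in range(2, size):
--         if spf[i] == 0:  # i is prime
--             spf[i] = i
--             for j in range(i * i, size, i):
--                 if spf[j] == 0:
--                     spf[j] = i
--     # count distinct primes of each i by SPF factorisation, keep a running total
--     pref = [0] * size
--     total = 0
--     for i in range(2, size):
--         cnt = 0
--         last = 0
--         m = i
--         while m > 1:
--             p = spf[m]
--             if p != last:
--                 cnt += 1
--                 last = p
--             m //= p
--         total += cnt
--         pref[i] = total
--     return pref
-- ===== Notes on version B (the rewrite author's own statement) =====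
-- stated objective: alternative
-- what changed: Replaces the count-accumulating modified sieve by a smallest-prime-factor sieve (marking from i*i, first prime wins) followed by per-number SPF factorisation counting distinct primes, with a running total instead of pref[i-1] lookups.
import Mathlib
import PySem

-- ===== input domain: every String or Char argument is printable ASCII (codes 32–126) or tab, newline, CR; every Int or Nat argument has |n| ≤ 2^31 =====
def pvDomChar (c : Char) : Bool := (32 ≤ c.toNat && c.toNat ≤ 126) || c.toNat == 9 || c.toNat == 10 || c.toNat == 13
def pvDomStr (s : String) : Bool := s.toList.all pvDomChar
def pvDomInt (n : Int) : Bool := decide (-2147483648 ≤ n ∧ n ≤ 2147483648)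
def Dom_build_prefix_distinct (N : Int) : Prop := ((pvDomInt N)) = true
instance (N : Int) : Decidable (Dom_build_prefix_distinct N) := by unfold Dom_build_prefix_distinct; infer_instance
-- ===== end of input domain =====

-- B replaces A's count-accumulating sieve by an SPF sieve + per-number factorisation (alternative
-- algorithm, not measured faster); equivalence of the returned list is proved for every N.

-- ===== PORT A =====
def build_prefix_distinct (N : Int) : List Int :=
  let f0 : List Int := PySem.List.pyRepeat [0] (N + 1)          -- f = [0] * (N + 1)
  let f := (PySem.List.pyRange 2 (N + 1) 1).foldl               -- for i in range(2, N + 1):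
    (fun f i =>
      if PySem.List.pyGetD f i 0 == 0 then                      --   if f[i] == 0:
        (PySem.List.pyRange i (N + 1) i).foldl                  --     for j in range(i, N + 1, i):
          (fun f j => PySem.List.pySetD f j (PySem.List.pyGetD f j 0 + 1))  -- f[j] += 1
          f
      else f) f0
  let pref0 : List Int := PySem.List.pyRepeat [0] (N + 1)       -- pref = [0] * (N + 1)
  (PySem.List.pyRange 1 (N + 1) 1).foldl                        -- for i in range(1, N + 1):
    (fun pref i =>
      PySem.List.pySetD pref i
        (PySem.List.pyGetD pref (i - 1) 0 + PySem.List.pyGetD f i 0))  -- pref[i] = pref[i-1] + f[i]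
    pref0

-- ===== PORT B =====
-- while m > 1: p = spf[m]; if p != last: cnt += 1; last = p; m //= p
-- (fuel = m.toNat bounds the number of iterations; the loop halves m each step)
def pvFactorLoop (spf : List Int) : Nat → Int → Int → Int
  | 0, _, _ => 0
  | fuel + 1, m, last =>
    if 1 < m then
      let p := PySem.List.pyGetD spf m 0
      (if p != last then (1 : Int) else 0) + pvFactorLoop spf fuel (PySem.Int.floordiv m p) p
    else 0

def build_prefix_distinct_alt (N : Int) : List Int :=
  let size := N + 1
  let spf0 : List Int := PySem.List.pyRepeat [0] size           -- spf = [0] * size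
  let spf := (PySem.List.pyRange 2 size 1).foldl                -- for i in range(2, size):
    (fun spf i =>
      if PySem.List.pyGetD spf i 0 == 0 then                    --   if spf[i] == 0:
        (PySem.List.pyRange (i * i) size i).foldl               --     for j in range(i*i, size, i):
          (fun spf j =>
            if PySem.List.pyGetD spf j 0 == 0 then              --       if spf[j] == 0:
              PySem.List.pySetD spf j i                         --         spf[j] = i
            else spf)
          (PySem.List.pySetD spf i i)                           --     spf[i] = i  (before the j-loop)
      else spf) spf0
  let st := (PySem.List.pyRange 2 size 1).foldl                 -- for i in range(2, size):
    (fun st i =>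
      let cnt := pvFactorLoop spf i.toNat i 0                   --   cnt = <distinct primes of i via spf>
      let total := st.2 + cnt                                   --   total += cnt
      (PySem.List.pySetD st.1 i total, total))                  --   pref[i] = total
    (PySem.List.pyRepeat [0] size, (0 : Int))                   -- pref = [0] * size; total = 0
  st.1

-- ===== PRECONDITION & SPEC =====
def Spec_build_prefix_distinct (N : Int) (out : List Int) : Prop := out = build_prefix_distinct_alt N
instance (N : Int) (out : List Int) : Decidable (Spec_build_prefix_distinct N out) := by unfold Spec_build_prefix_distinct; infer_instance

-- ===== CLAIM (what is proved, stated in full; the proofs are below) =====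
def Claim_equal_build_prefix_distinct : Prop := ∀ (N : Int), Dom_build_prefix_distinct N → Spec_build_prefix_distinct N (build_prefix_distinct N)

-- ===== LEMMAS AND PROOFS =====

-- number of distinct prime factors, and its prefix sums (the common reference value)
def pvOmega (j : Nat) : Int := (j.primeFactors.card : Int)
def pvPref (j : Nat) : Int := (((Finset.range (j + 1)).sum fun k => k.primeFactors.card : Nat) : Int)
-- A's f after the primes < k have been processed
def pvFA (k j : Nat) : Int :=
  if j = 0 then 0 else ((((Finset.range k).filter fun p => p.Prime ∧ p ∣ j).card : Nat) : Int)
-- B's spf after the primes < k have been processed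
def pvSB (k j : Nat) : Int := if 2 ≤ j ∧ j.minFac < k then (j.minFac : Int) else 0

lemma pv_pyRange_pos_nodup (a b s : Int) (hs : 0 < s) : (PySem.List.pyRange a b s).Nodup := by
  rw [PySem.List.pyRange_of_pos a b hs]
  refine List.Nodup.map ?_ (List.nodup_range)
  intro k1 k2 h
  have h2 : s * (k1 : Int) = s * k2 := add_left_cancel h
  have h3 : (k1 : Int) = k2 := mul_left_cancel₀ (ne_of_gt hs) h2
  exact_mod_cast h3

lemma pv_mem_pyRange_mult (K n : Nat) (h2 : 0 < K) (x : Int) :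
    x ∈ PySem.List.pyRange (K : Int) (n : Int) (K : Int) ↔ (K : Int) ≤ x ∧ x < n ∧ (K : Int) ∣ x := by
  rw [PySem.List.mem_pyRange_iff_of_pos (by exact_mod_cast h2)]
  constructor
  · rintro ⟨h1, h2, h3⟩
    refine ⟨h1, h2, ?_⟩
    have := dvd_add h3 (dvd_refl (K : Int))
    simpa using this
  · rintro ⟨h1, h2, h3⟩
    exact ⟨h1, h2, dvd_sub h3 (dvd_refl _)⟩

lemma pv_mem_pyRange_sq (K n : Nat) (h2 : 0 < K) (x : Int) :
    x ∈ PySem.List.pyRange ((K : Int) * K) (n : Int) (K : Int)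
      ↔ ((K : Int) * K ≤ x ∧ x < n ∧ (K : Int) ∣ x) := by
  rw [PySem.List.mem_pyRange_iff_of_pos (by exact_mod_cast h2)]
  constructor
  · rintro ⟨h1, h2, h3⟩
    refine ⟨h1, h2, ?_⟩
    have := dvd_add h3 (Dvd.intro (K : Int) rfl)
    simpa using this
  · rintro ⟨h1, h2, h3⟩
    exact ⟨h1, h2, dvd_sub h3 (Dvd.intro (K : Int) rfl)⟩

-- a composite multiple: minFac idx = K and idx ≠ K force K*K ≤ idx

lemma pv_getD_map (n : Nat) (g : Nat → Int) (m : Nat) :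
    PySem.List.pyGetD ((List.range n).map g) (m : Int) 0 = if m < n then g m else 0 := by
  rw [PySem.List.pyGetD_natCast]
  by_cases h : m < n
  · rw [if_pos h, PySem.List.getD_map_range g n m 0 h]
  · rw [if_neg h, List.getD_eq_default]
    simpa using h

lemma pv_getelem_pyGetD (l : List Int) (idx : Nat) (h : idx < l.length) :
    l[idx] = PySem.List.pyGetD l (idx : Int) 0 := by
  rw [PySem.List.pyGetD_natCast, List.getD_eq_getElem?_getD, List.getElem?_eq_getElem h]
  rfl

lemma pv_replicate_eq_map (n : Nat) (g : Nat → Int) (hg : ∀ j < n, g j = 0) :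
    List.replicate n (0 : Int) = (List.range n).map g := by
  apply List.ext_getElem
  · simp
  · intro i h1 h2
    simp at h1 h2 ⊢
    exact (hg i h2).symm

lemma pv_foldl_addAt (idxs : List Int) : ∀ (l : List Int),
    (∀ j ∈ idxs, 0 ≤ j ∧ j < (l.length : Int)) → idxs.Nodup →
    (idxs.foldl (fun f j => PySem.List.pySetD f j (PySem.List.pyGetD f j 0 + 1)) l).length = l.length ∧
    ∀ m : Nat,
      PySem.List.pyGetD (idxs.foldl (fun f j => PySem.List.pySetD f j (PySem.List.pyGetD f j 0 + 1)) l) (m : Int) 0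
        = PySem.List.pyGetD l (m : Int) 0 + (if (m : Int) ∈ idxs then 1 else 0) := by
  induction idxs with
  | nil => intro l _ _; simp
  | cons a t ih =>
    intro l hin hnd
    have ha := hin a (List.mem_cons_self)
    have hat : (a.toNat : Int) = a := Int.toNat_of_nonneg ha.1
    have haN : a.toNat < l.length := by omega
    set l' := PySem.List.pySetD l a (PySem.List.pyGetD l a 0 + 1) with hl'
    have hlen' : l'.length = l.length := PySem.List.length_pySetD l a _
    have hin' : ∀ j ∈ t, 0 ≤ j ∧ j < (l'.length : Int) := by
      intro j hj; rw [hlen']; exact hin j (List.mem_cons_of_mem a hj)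
    obtain ⟨ihl, ihg⟩ := ih l' hin' (List.nodup_cons.mp hnd).2
    have hna : a ∉ t := (List.nodup_cons.mp hnd).1
    constructor
    · simpa [hlen'] using ihl
    · intro m
      rw [List.foldl_cons, ← hl', ihg m]
      have hchar : PySem.List.pyGetD l' (m : Int) 0
          = if m = a.toNat then PySem.List.pyGetD l (m : Int) 0 + 1
            else PySem.List.pyGetD l (m : Int) 0 := by
        have key := PySem.List.pyGetD_pySetD_natCast l a.toNat m (PySem.List.pyGetD l a 0 + 1) 0 haN
        rw [hat] at key
        rw [hl', key]
        by_cases hm : m = a.toNat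
        · rw [if_pos hm, if_pos hm, hm, hat]
        · rw [if_neg hm, if_neg hm]
      by_cases hma : (m : Int) = a
      · have : m = a.toNat := by omega
        rw [hchar, if_pos this]
        simp [hma, hna]
      · have : m ≠ a.toNat := by omega
        rw [hchar, if_neg this]
        by_cases hmt : (m : Int) ∈ t <;> simp [hmt, hma]

lemma pv_foldl_setIfZero (idxs : List Int) (v : Int) : ∀ (l : List Int),
    (∀ j ∈ idxs, 0 ≤ j ∧ j < (l.length : Int)) → idxs.Nodup →
    (idxs.foldl (fun f j => if PySem.List.pyGetD f j 0 == 0 then PySem.List.pySetD f j v else f) l).length = l.length ∧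
    ∀ m : Nat,
      PySem.List.pyGetD (idxs.foldl (fun f j => if PySem.List.pyGetD f j 0 == 0 then PySem.List.pySetD f j v else f) l) (m : Int) 0
        = if (m : Int) ∈ idxs ∧ PySem.List.pyGetD l (m : Int) 0 = 0 then v
          else PySem.List.pyGetD l (m : Int) 0 := by
  induction idxs with
  | nil => intro l _ _; simp
  | cons a t ih =>
    intro l hin hnd
    have ha := hin a (List.mem_cons_self)
    have hat : (a.toNat : Int) = a := Int.toNat_of_nonneg ha.1
    have haN : a.toNat < l.length := by omega
    have hna : a ∉ t := (List.nodup_cons.mp hnd).1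
    set l' := (if PySem.List.pyGetD l a 0 == 0 then PySem.List.pySetD l a v else l) with hl'
    have hlen' : l'.length = l.length := by
      rw [hl']; split
      · exact PySem.List.length_pySetD l a v
      · rfl
    have hin' : ∀ j ∈ t, 0 ≤ j ∧ j < (l'.length : Int) := by
      intro j hj; rw [hlen']; exact hin j (List.mem_cons_of_mem a hj)
    obtain ⟨ihl, ihg⟩ := ih l' hin' (List.nodup_cons.mp hnd).2
    have hchar : ∀ m : Nat, PySem.List.pyGetD l' (m : Int) 0
        = if m = a.toNat ∧ PySem.List.pyGetD l a 0 = 0 then v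
          else PySem.List.pyGetD l (m : Int) 0 := by
      intro m
      rw [hl']
      by_cases hz : PySem.List.pyGetD l a 0 = 0
      · have key := PySem.List.pyGetD_pySetD_natCast l a.toNat m v 0 haN
        rw [hat] at key
        rw [if_pos (by simpa using hz), key]
        by_cases hma : m = a.toNat
        · rw [if_pos hma, if_pos ⟨hma, hz⟩]
        · rw [if_neg hma, if_neg (fun h => hma h.1)]
      · rw [if_neg (by simpa using hz), if_neg (fun h => hz h.2)]
    constructor
    · rw [List.foldl_cons, ← hl', ihl, hlen']
    · intro m
      rw [List.foldl_cons, ← hl', ihg m]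
      by_cases hma : (m : Int) = a
      · have hmn : m = a.toNat := by omega
        have hmt : (m : Int) ∉ t := by rw [hma]; exact hna
        rw [if_neg (fun h => hmt h.1), hchar m]
        by_cases hz : PySem.List.pyGetD l a 0 = 0
        · rw [if_pos ⟨hmn, hz⟩,
            if_pos ⟨by rw [hma]; exact List.mem_cons_self, by rwa [hma]⟩]
        · rw [if_neg (fun h => hz h.2), if_neg (by rw [hma]; exact fun h => hz h.2)]
      · have hmn : m ≠ a.toNat := by omega
        have hl'm : PySem.List.pyGetD l' (m : Int) 0 = PySem.List.pyGetD l (m : Int) 0 := by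
          rw [hchar m, if_neg (fun h => hmn h.1)]
        rw [hl'm]
        simp only [List.mem_cons, hma, false_or]

lemma pv_fA_two (j : Nat) : pvFA 2 j = 0 := by
  unfold pvFA
  split
  · rfl
  · norm_num

lemma pv_fA_zero_iff_prime (K : Nat) (h2 : 2 ≤ K) : pvFA K K = 0 ↔ K.Prime := by
  unfold pvFA
  rw [if_neg (by omega)]
  norm_num
  constructor
  · intro h
    obtain ⟨p, hpp, hpd⟩ := Nat.exists_prime_and_dvd (by omega : K ≠ 1)
    have hple : p ≤ K := Nat.le_of_dvd (by omega) hpd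
    rcases lt_or_eq_of_le hple with h1 | h1
    · exact absurd hpd (h h1 hpp)
    · rwa [h1] at hpp
  · intro hP p hp hpp hpd
    rcases Nat.Prime.eq_one_or_self_of_dvd hP p hpd with h | h
    · exact Nat.Prime.one_lt hpp |>.ne' (by omega)
    · omega

lemma pv_fA_succ_prime (K : Nat) (h2 : 2 ≤ K) (hP : K.Prime) (idx : Nat) :
    pvFA (K + 1) idx = pvFA K idx + (if K ≤ idx ∧ K ∣ idx then 1 else 0) := by
  unfold pvFA
  by_cases h0 : idx = 0
  · subst h0
    rw [if_pos rfl, if_pos rfl, if_neg (by omega)]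
    ring
  · rw [if_neg h0, if_neg h0, Finset.range_add_one, Finset.filter_insert]
    by_cases hd : K ∣ idx
    · rw [if_pos ⟨hP, hd⟩, Finset.card_insert_of_notMem (by simp), 
        if_pos ⟨Nat.le_of_dvd (Nat.pos_of_ne_zero h0) hd, hd⟩]
      push_cast; ring
    · rw [if_neg (fun h => hd h.2), if_neg (fun h => hd h.2)]
      ring

lemma pv_fA_succ_notprime (K : Nat) (hP : ¬ K.Prime) (idx : Nat) :
    pvFA (K + 1) idx = pvFA K idx := by
  unfold pvFA
  by_cases h0 : idx = 0
  · simp [h0]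
  · rw [if_neg h0, if_neg h0, Finset.range_add_one, Finset.filter_insert,
      if_neg (fun h => hP h.1)]

lemma pv_fA_final (n j : Nat) (hj : j < n) : pvFA n j = pvOmega j := by
  unfold pvFA pvOmega
  split
  · rename_i h; subst h; simp
  · rename_i h
    congr 2
    ext q
    simp only [Finset.mem_filter, Finset.mem_range, Nat.mem_primeFactors]
    constructor
    · rintro ⟨-, hq, hd⟩; exact ⟨hq, hd, h⟩
    · rintro ⟨hq, hd, -⟩
      exact ⟨lt_of_le_of_lt (Nat.le_of_dvd (Nat.pos_of_ne_zero h) hd) hj, hq, hd⟩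

lemma pv_stepA (n K : Nat) (h2 : 2 ≤ K) (hK : K < n) :
    (fun f (i : Int) =>
        if PySem.List.pyGetD f i 0 == 0 then
          (PySem.List.pyRange i (n : Int) i).foldl
            (fun f j => PySem.List.pySetD f j (PySem.List.pyGetD f j 0 + 1)) f
        else f)
      ((List.range n).map (pvFA K)) (K : Int)
    = (List.range n).map (pvFA (K + 1)) := by
  simp only [beq_iff_eq]
  have hc : PySem.List.pyGetD ((List.range n).map (pvFA K)) (K : Int) 0 = pvFA K K := by
    rw [pv_getD_map, if_pos hK]
  rw [hc]
  by_cases hP : K.Prime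
  · rw [if_pos ((pv_fA_zero_iff_prime K h2).mpr hP)]
    have hlenmap : ((List.range n).map (pvFA K)).length = n := by simp
    obtain ⟨hlen, hget⟩ := pv_foldl_addAt (PySem.List.pyRange (K : Int) (n : Int) (K : Int))
      ((List.range n).map (pvFA K))
      (by
        intro j hj
        rw [(pv_mem_pyRange_mult K n (by omega) j)] at hj
        rw [hlenmap]
        exact ⟨by omega, hj.2.1⟩)
      (pv_pyRange_pos_nodup _ _ _ (by exact_mod_cast (by omega : 0 < K)))
    apply List.ext_getElem
    · simp [hlen]
    · intro idx hi1 hi2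
      have hidx : idx < n := by simpa using hi2
      rw [List.getElem_map, List.getElem_range,
        pv_getelem_pyGetD _ idx (by omega : idx < _), hget idx, pv_getD_map, if_pos hidx,
        pv_fA_succ_prime K h2 hP idx]
      congr 1
      by_cases hm : (K : Int) ≤ (idx : Int) ∧ (idx : Int) < (n : Int) ∧ (K : Int) ∣ (idx : Int)
      · rw [if_pos ((pv_mem_pyRange_mult K n (by omega) idx).mpr hm),
          if_pos ⟨by exact_mod_cast hm.1, by exact_mod_cast hm.2.2⟩]
      · rw [if_neg (fun h => hm ((pv_mem_pyRange_mult K n (by omega) idx).mp h)),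
          if_neg (by
            rintro ⟨ha, hb⟩
            exact hm ⟨by exact_mod_cast ha, by exact_mod_cast hidx, by exact_mod_cast hb⟩)]
  · rw [if_neg (fun h => hP ((pv_fA_zero_iff_prime K h2).mp h))]
    apply List.map_congr_left
    intro idx _
    exact (pv_fA_succ_notprime K hP idx).symm

lemma pv_sieveA (n : Nat) (K : Nat) (h2 : 2 ≤ K) (hK : K ≤ n) :
    (PySem.List.pyRange 2 (K : Int) 1).foldl
      (fun f (i : Int) =>
        if PySem.List.pyGetD f i 0 == 0 then
          (PySem.List.pyRange i (n : Int) i).foldl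
            (fun f j => PySem.List.pySetD f j (PySem.List.pyGetD f j 0 + 1)) f
        else f)
      ((List.range n).map (pvFA 2))
    = (List.range n).map (pvFA K) := by
  induction K, h2 using Nat.le_induction with
  | base =>
    rw [PySem.List.pyRange_one_eq_nil (by norm_num)]
    rfl
  | succ K hK2 ih =>
    have hKn : K < n := by omega
    have hcast : ((K + 1 : Nat) : Int) = (K : Int) + 1 := by push_cast; ring
    rw [hcast, PySem.List.pyRange_one_succ_right (by exact_mod_cast (by omega : (2:Int) ≤ K)),
      List.foldl_append, ih (by omega)]
    simpa using pv_stepA n K hK2 hKn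

lemma pv_sB_two (j : Nat) : pvSB 2 j = 0 := by
  unfold pvSB
  split
  · rename_i h
    have := (Nat.minFac_prime (by omega : j ≠ 1)).two_le
    omega
  · rfl

lemma pv_sq_le_of_minFac (K idx : Nat) (h2 : 2 ≤ idx) (hne : idx ≠ K) (hmf : idx.minFac = K) :
    K * K ≤ idx := by
  have hd : K ∣ idx := hmf ▸ Nat.minFac_dvd idx
  set q := idx / K with hq
  have hKpos : 0 < K := by
    rcases Nat.eq_zero_or_pos K with h | h
    · subst h; simp at hd; omega
    · exact h
  have hmul : K * q = idx := Nat.mul_div_cancel' hd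
  have hq1 : q ≠ 1 := by intro h; rw [h] at hmul; omega
  have hq0 : q ≠ 0 := by intro h; rw [h] at hmul; omega
  have hqd : q ∣ idx := ⟨K, by rw [← hmul, mul_comm]⟩
  have hqm : q.minFac ∣ idx := dvd_trans (Nat.minFac_dvd q) hqd
  have hKle : K ≤ q.minFac := by
    rw [← hmf]
    exact Nat.minFac_le_of_dvd (Nat.minFac_prime hq1).two_le hqm
  have : K ≤ q := le_trans hKle (Nat.minFac_le (Nat.pos_of_ne_zero hq0))
  calc K * K ≤ K * q := Nat.mul_le_mul_left K this
    _ = idx := hmul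

lemma pv_sB_succ_notprime (K : Nat) (hP : ¬ K.Prime) (idx : Nat) :
    pvSB (K + 1) idx = pvSB K idx := by
  unfold pvSB
  by_cases h : 2 ≤ idx ∧ idx.minFac < K
  · rw [if_pos ⟨h.1, by omega⟩, if_pos h]
  · rw [if_neg h]
    by_cases h1 : 2 ≤ idx ∧ idx.minFac < K + 1
    · exfalso
      have : idx.minFac = K := by omega
      exact hP (this ▸ Nat.minFac_prime (by omega : idx ≠ 1))
    · rw [if_neg h1]

lemma pv_stepB (n K : Nat) (h2 : 2 ≤ K) (hK : K < n) :
    (fun spf (i : Int) =>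
        if PySem.List.pyGetD spf i 0 == 0 then
          (PySem.List.pyRange (i * i) (n : Int) i).foldl
            (fun spf j =>
              if PySem.List.pyGetD spf j 0 == 0 then PySem.List.pySetD spf j i else spf)
            (PySem.List.pySetD spf i i)
        else spf)
      ((List.range n).map (pvSB K)) (K : Int)
    = (List.range n).map (pvSB (K + 1)) := by
  simp only [beq_iff_eq]
  have hc : PySem.List.pyGetD ((List.range n).map (pvSB K)) (K : Int) 0 = pvSB K K := by
    rw [pv_getD_map, if_pos hK]
  rw [hc]
  have hK1 : K ≠ 1 := by omega
  by_cases hP : K.Prime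
  · have hmfK : K.minFac = K := (Nat.prime_def_minFac.mp hP).2
    rw [if_pos (by unfold pvSB; rw [if_neg (by omega)])]
    set l' := PySem.List.pySetD ((List.range n).map (pvSB K)) (K : Int) (K : Int) with hl'
    have hlen' : l'.length = n := by
      rw [hl', PySem.List.length_pySetD]; simp
    have hl'char : ∀ m : Nat, PySem.List.pyGetD l' (m : Int) 0
        = if m = K then (K : Int) else if m < n then pvSB K m else 0 := by
      intro m
      have key := PySem.List.pyGetD_pySetD_natCast ((List.range n).map (pvSB K)) K m (K : Int) 0
        (by simpa using hK)
      rw [hl', key, pv_getD_map]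
    obtain ⟨hlen, hget⟩ := pv_foldl_setIfZero
      (PySem.List.pyRange ((K : Int) * K) (n : Int) (K : Int)) (K : Int) l'
      (by
        intro j hj
        rw [pv_mem_pyRange_sq K n (by omega) j] at hj
        have : (0 : Int) ≤ (K : Int) * K := by positivity
        rw [hlen']
        exact ⟨by omega, hj.2.1⟩)
      (pv_pyRange_pos_nodup _ _ _ (by exact_mod_cast (by omega : 0 < K)))
    simp only [beq_iff_eq] at hlen hget
    apply List.ext_getElem
    · rw [hlen, hlen']; simp
    · intro idx hi1 hi2
      have hidx : idx < n := by simpa using hi2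
      rw [List.getElem_map, List.getElem_range,
        pv_getelem_pyGetD _ idx (by omega : idx < _), hget idx, hl'char idx]
      by_cases hiK : idx = K
      · have hnm : (idx : Int) ∉ PySem.List.pyRange ((K : Int) * K) (n : Int) (K : Int) := by
          rw [pv_mem_pyRange_sq K n (by omega)]
          rintro ⟨ha, -, -⟩
          rw [hiK] at ha
          nlinarith [show (2 : Int) ≤ (K : Int) by exact_mod_cast h2]
        rw [if_neg (fun h => hnm h.1), if_pos hiK]
        unfold pvSB
        rw [hiK, if_pos ⟨h2, by omega⟩, hmfK]
      · rw [if_neg hiK]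
        rw [if_pos hidx]
        by_cases hlt2 : idx < 2
        · have hnm : (idx : Int) ∉ PySem.List.pyRange ((K : Int) * K) (n : Int) (K : Int) := by
            rw [pv_mem_pyRange_sq K n (by omega)]
            rintro ⟨ha, -, -⟩
            have h4 : (4 : Int) ≤ (K : Int) * K := by nlinarith [show (2:Int) ≤ (K:Int) by exact_mod_cast h2]
            omega
          rw [if_neg (fun h => hnm h.1)]
          unfold pvSB
          rw [if_neg (by omega), if_neg (by omega)]
        · have hi2' : 2 ≤ idx := by omega
          have hmf2 : 2 ≤ idx.minFac := (Nat.minFac_prime (by omega : idx ≠ 1)).two_le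
          by_cases hsml : idx.minFac < K
          · have hvz : pvSB K idx ≠ 0 := by
              unfold pvSB
              rw [if_pos ⟨hi2', hsml⟩]
              exact_mod_cast (by omega : idx.minFac ≠ 0)
            rw [if_neg (fun h => hvz h.2)]
            unfold pvSB
            rw [if_pos ⟨hi2', hsml⟩, if_pos ⟨hi2', by omega⟩]
          · have hzero : pvSB K idx = 0 := by
              unfold pvSB
              rw [if_neg (fun h => hsml h.2)]
            by_cases hmf : idx.minFac = K
            · have hmem : (idx : Int) ∈ PySem.List.pyRange ((K : Int) * K) (n : Int) (K : Int) := by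
                rw [pv_mem_pyRange_sq K n (by omega)]
                refine ⟨?_, by exact_mod_cast hidx, ?_⟩
                · exact_mod_cast pv_sq_le_of_minFac K idx hi2' hiK hmf
                · exact_mod_cast (hmf ▸ Nat.minFac_dvd idx)
              rw [if_pos ⟨hmem, hzero⟩]
              unfold pvSB
              rw [if_pos ⟨hi2', by omega⟩, hmf]
            · have hgt : K < idx.minFac := by omega
              have hnd : ¬ (K : Int) ∣ (idx : Int) := by
                rw [Int.natCast_dvd_natCast]
                intro hd
                exact absurd (Nat.minFac_le_of_dvd hP.two_le hd) (by omega)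
              have hnm : (idx : Int) ∉ PySem.List.pyRange ((K : Int) * K) (n : Int) (K : Int) := by
                rw [pv_mem_pyRange_sq K n (by omega)]
                rintro ⟨-, -, hd⟩
                exact hnd hd
              rw [if_neg (fun h => hnm h.1), hzero]
              unfold pvSB
              rw [if_neg (fun h => by omega)]
  · have hmfKlt : K.minFac < K := by
      have hle := Nat.minFac_le (by omega : 0 < K)
      rcases lt_or_eq_of_le hle with h | h
      · exact h
      · exact absurd (h ▸ Nat.minFac_prime hK1) hP
    have hKmf2 : 2 ≤ K.minFac := (Nat.minFac_prime hK1).two_le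
    rw [if_neg (by
      unfold pvSB
      rw [if_pos ⟨h2, hmfKlt⟩]
      exact_mod_cast (by omega : K.minFac ≠ 0))]
    apply List.map_congr_left
    intro idx _
    exact (pv_sB_succ_notprime K hP idx).symm

lemma pv_factorLoop (n : Nat) (spf : List Int)
    (hspf : ∀ j : Nat, 2 ≤ j → j < n → PySem.List.pyGetD spf (j : Int) 0 = (j.minFac : Int)) :
    ∀ (fuel : Nat) (m : Nat) (last : Int), 1 ≤ m → m < n → m ≤ fuel →
      (∀ q ∈ m.primeFactors, last ≤ (q : Int)) →
      pvFactorLoop spf fuel (m : Int) last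
        = ((m.primeFactors.filter fun q : Nat => (q : Int) ≠ last).card : Int) := by
  intro fuel
  induction fuel with
  | zero => intro m last h1 _ hf _; omega
  | succ fuel ih =>
    intro m last h1 hn hf hinv
    by_cases hm1 : m = 1
    · subst hm1
      show (if (1 : Int) < ((1 : Nat) : Int) then _ else _) = _
      rw [if_neg (by norm_num)]
      simp
    · have h2 : 2 ≤ m := by omega
      have hm0 : m ≠ 0 := by omega
      set p := m.minFac with hp
      have hpP : p.Prime := Nat.minFac_prime hm1
      have hpd : p ∣ m := Nat.minFac_dvd m
      have hp2 : 2 ≤ p := hpP.two_le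
      set m' := m / p with hm'
      have hmul : p * m' = m := Nat.mul_div_cancel' hpd
      have hm'0 : m' ≠ 0 := by intro h; rw [h] at hmul; omega
      have hm'lt : m' < m := Nat.div_lt_self (by omega) (by omega)
      have hSins : m.primeFactors = insert p m'.primeFactors := by
        rw [← hmul, Nat.primeFactors_mul (by omega) hm'0, Nat.Prime.primeFactors hpP]
        rfl
      have hSge : ∀ q ∈ m'.primeFactors, p ≤ q := by
        intro q hq
        have hq' : q ∈ m.primeFactors :=
          Nat.primeFactors_mono (Nat.div_dvd_of_dvd hpd) hm0 hq
        exact Nat.minFac_le_of_dvd (Nat.mem_primeFactors.mp hq').1.two_le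
          (Nat.mem_primeFactors.mp hq').2.1
      have hpmem : p ∈ m.primeFactors := Nat.mem_primeFactors.mpr ⟨hpP, hpd, hm0⟩
      have hlastp : last ≤ (p : Int) := hinv p hpmem
      have hstep : pvFactorLoop spf (fuel + 1) (m : Int) last
          = (if ((p : Int) != last) = true then (1 : Int) else 0)
            + pvFactorLoop spf fuel (PySem.Int.floordiv (m : Int) (p : Int)) (p : Int) := by
        show (if 1 < (m : Int) then
            (if (PySem.List.pyGetD spf (m : Int) 0 != last) = true then (1 : Int) else 0)
              + pvFactorLoop spf fuel
                  (PySem.Int.floordiv (m : Int) (PySem.List.pyGetD spf (m : Int) 0))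
                  (PySem.List.pyGetD spf (m : Int) 0)
          else 0) = _
        rw [if_pos (by exact_mod_cast h2), hspf m h2 hn]
      rw [hstep, PySem.Int.floordiv_natCast m p, ← hm',
        ih m' (p : Int) (Nat.pos_of_ne_zero hm'0) (by omega) (by omega)
          (fun q hq => by exact_mod_cast hSge q hq)]
      by_cases hpl : (p : Int) = last
      · rw [if_neg (by simp [hpl])]
        have hflt : (m.primeFactors.filter fun q : Nat => (q : Int) ≠ last)
            = m'.primeFactors.filter fun q : Nat => (q : Int) ≠ (p : Int) := by
          rw [hSins, Finset.filter_insert, if_neg (by simp [hpl]), hpl]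
        rw [hflt]
        ring
      · rw [if_pos (by simp [bne_iff_ne]; exact fun h => hpl h)]
        have hltp : last < (p : Int) := lt_of_le_of_ne hlastp (fun h => hpl h.symm)
        have h1' : (m.primeFactors.filter fun q : Nat => (q : Int) ≠ last) = m.primeFactors := by
          apply Finset.filter_true_of_mem
          intro q hq
          rw [hSins] at hq
          rcases Finset.mem_insert.mp hq with h | h
          · subst h; exact fun he => hpl he
          · have := hSge q h
            intro he
            omega
        have h2' : (m'.primeFactors.filter fun q : Nat => (q : Int) ≠ (p : Int))
            = m'.primeFactors.erase p := by
          ext q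
          simp only [Finset.mem_filter, Finset.mem_erase, ne_eq, Int.natCast_inj]
          tauto
        rw [h1', h2', hSins, Finset.card_insert_eq_ite]
        by_cases hmem : p ∈ m'.primeFactors
        · rw [if_pos hmem, Finset.card_erase_of_mem hmem]
          have hcpos : 1 ≤ m'.primeFactors.card := Finset.card_pos.mpr ⟨p, hmem⟩
          push_cast [Nat.cast_sub hcpos]
          ring
        · rw [if_neg hmem, Finset.erase_eq_of_notMem hmem]
          push_cast
          ring

lemma pv_pref_one : pvPref 1 = 0 := by
  unfold pvPref
  rw [Finset.sum_range_succ, Finset.sum_range_succ]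
  simp

lemma pv_pref_succ (K : Nat) (h1 : 1 ≤ K) : pvPref (K - 1) + pvOmega K = pvPref K := by
  obtain ⟨K', rfl⟩ : ∃ K', K = K' + 1 := ⟨K - 1, by omega⟩
  unfold pvPref pvOmega
  rw [show K' + 1 - 1 = K' by omega, Finset.sum_range_succ (n := K' + 1)]
  push_cast
  ring

lemma pv_factorLoop_omega (n : Nat) (spf : List Int)
    (hspf : ∀ j : Nat, 2 ≤ j → j < n → PySem.List.pyGetD spf (j : Int) 0 = (j.minFac : Int))
    (m : Nat) (h1 : 1 ≤ m) (hm : m < n) :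
    pvFactorLoop spf m (m : Int) 0 = pvOmega m := by
  rw [pv_factorLoop n spf hspf m m 0 h1 hm le_rfl
    (fun q hq => by positivity)]
  unfold pvOmega
  congr 1
  rw [Finset.filter_true_of_mem]
  intro q hq
  have := (Nat.mem_primeFactors.mp hq).1.two_le
  intro h
  omega

lemma pv_prefA (n : Nat) (f : List Int) (hf : f = (List.range n).map pvOmega)
    (K : Nat) (h1 : 1 ≤ K) (hK : K ≤ n) :
    (PySem.List.pyRange 1 (K : Int) 1).foldl
      (fun pref (i : Int) =>
        PySem.List.pySetD pref i
          (PySem.List.pyGetD pref (i - 1) 0 + PySem.List.pyGetD f i 0))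
      ((List.range n).map fun j => if j < 1 then pvPref j else 0)
    = (List.range n).map fun j => if j < K then pvPref j else 0 := by
  induction K, h1 using Nat.le_induction with
  | base =>
    rw [PySem.List.pyRange_one_eq_nil (by norm_num)]
    rfl
  | succ K hK1 ih =>
    have hKn : K < n := by omega
    have hcast : ((K + 1 : Nat) : Int) = (K : Int) + 1 := by push_cast; ring
    rw [hcast, PySem.List.pyRange_one_succ_right (by exact_mod_cast (by omega : (1:Int) ≤ K)),
      List.foldl_append, ih (by omega)]
    simp only [List.foldl_cons, List.foldl_nil]
    have hsub : ((K : Int) - 1) = ((K - 1 : Nat) : Int) := by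
      have : 1 ≤ K := by omega
      push_cast [Nat.cast_sub this]
      ring
    rw [hsub, pv_getD_map, if_pos (by omega : K - 1 < n), if_pos (by omega : K - 1 < K),
      hf, pv_getD_map, if_pos hKn]
    have hval : pvPref (K - 1) + pvOmega K = pvPref K := pv_pref_succ K (by omega)
    rw [hval]
    apply List.ext_getElem
    · rw [PySem.List.length_pySetD]; simp
    · intro idx hi1 hi2
      have hidx : idx < n := by simpa using hi2
      have hKlen : K < ((List.range n).map fun j => if j < K then pvPref j else 0).length := by
        simpa using hKn
      have key := PySem.List.pyGetD_pySetD_natCast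
        ((List.range n).map fun j => if j < K then pvPref j else 0) K idx (pvPref K) 0 hKlen
      rw [List.getElem_map, List.getElem_range,
        pv_getelem_pyGetD _ idx (by rw [PySem.List.length_pySetD]; simpa using hidx), key,
        pv_getD_map]
      by_cases hi : idx = K
      · rw [if_pos hi, hi, if_pos (by omega)]
      · rw [if_neg hi, if_pos hidx]
        by_cases hlt : idx < K
        · rw [if_pos hlt, if_pos (by omega)]
        · rw [if_neg hlt, if_neg (by omega)]

lemma pv_prefB (n : Nat) (spf : List Int)
    (hspf : ∀ j : Nat, 2 ≤ j → j < n → PySem.List.pyGetD spf (j : Int) 0 = (j.minFac : Int))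
    (K : Nat) (h2 : 2 ≤ K) (hK : K ≤ n) :
    (PySem.List.pyRange 2 (K : Int) 1).foldl
      (fun st (i : Int) =>
        (PySem.List.pySetD st.1 i (st.2 + pvFactorLoop spf i.toNat i 0),
          st.2 + pvFactorLoop spf i.toNat i 0))
      ((List.range n).map (fun j => if 2 ≤ j ∧ j < 2 then pvPref j else 0), (0 : Int))
    = ((List.range n).map fun j => if 2 ≤ j ∧ j < K then pvPref j else 0, pvPref (K - 1)) := by
  induction K, h2 using Nat.le_induction with
  | base =>
    rw [PySem.List.pyRange_one_eq_nil (by norm_num)]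
    simp only [List.foldl_nil]
    rw [show (2 : Nat) - 1 = 1 from rfl, pv_pref_one]
  | succ K hK2 ih =>
    have hKn : K < n := by omega
    have hcast : ((K + 1 : Nat) : Int) = (K : Int) + 1 := by push_cast; ring
    rw [hcast, PySem.List.pyRange_one_succ_right (by exact_mod_cast (by omega : (2:Int) ≤ K)),
      List.foldl_append, ih (by omega)]
    simp only [List.foldl_cons, List.foldl_nil]
    have htn : ((K : Int)).toNat = K := Int.toNat_natCast K
    have hcnt : pvFactorLoop spf ((K : Int)).toNat (K : Int) 0 = pvOmega K := by
      rw [htn]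
      exact pv_factorLoop_omega n spf hspf K (by omega) hKn
    have hval : pvPref (K - 1) + pvOmega K = pvPref K := pv_pref_succ K (by omega)
    rw [hcnt, hval]
    have hfst : PySem.List.pySetD
        ((List.range n).map fun j => if 2 ≤ j ∧ j < K then pvPref j else 0) (K : Int) (pvPref K)
        = (List.range n).map fun j => if 2 ≤ j ∧ j < K + 1 then pvPref j else 0 := by
      apply List.ext_getElem
      · rw [PySem.List.length_pySetD]; simp
      · intro idx hi1 hi2
        have hidx : idx < n := by simpa using hi2
        have hKlen : K < ((List.range n).map fun j => if 2 ≤ j ∧ j < K then pvPref j else 0).length := by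
          simpa using hKn
        have key := PySem.List.pyGetD_pySetD_natCast
          ((List.range n).map fun j => if 2 ≤ j ∧ j < K then pvPref j else 0) K idx (pvPref K) 0 hKlen
        rw [List.getElem_map, List.getElem_range,
          pv_getelem_pyGetD _ idx (by rw [PySem.List.length_pySetD]; simpa using hidx), key,
          pv_getD_map]
        by_cases hi : idx = K
        · rw [if_pos hi, hi, if_pos (by omega)]
        · rw [if_neg hi, if_pos hidx]
          by_cases hlt : 2 ≤ idx ∧ idx < K
          · rw [if_pos hlt, if_pos (by omega)]
          · rw [if_neg hlt, if_neg (by omega)]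
    rw [hfst, show K + 1 - 1 = K from rfl]


lemma pv_sieveB (n : Nat) (K : Nat) (h2 : 2 ≤ K) (hK : K ≤ n) :
    (PySem.List.pyRange 2 (K : Int) 1).foldl
      (fun spf (i : Int) =>
        if PySem.List.pyGetD spf i 0 == 0 then
          (PySem.List.pyRange (i * i) (n : Int) i).foldl
            (fun spf j =>
              if PySem.List.pyGetD spf j 0 == 0 then PySem.List.pySetD spf j i else spf)
            (PySem.List.pySetD spf i i)
        else spf)
      ((List.range n).map (pvSB 2))
    = (List.range n).map (pvSB K) := by
  induction K, h2 using Nat.le_induction with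
  | base =>
    rw [PySem.List.pyRange_one_eq_nil (by norm_num)]
    rfl
  | succ K hK2 ih =>
    have hKn : K < n := by omega
    have hcast : ((K + 1 : Nat) : Int) = (K : Int) + 1 := by push_cast; ring
    rw [hcast, PySem.List.pyRange_one_succ_right (by exact_mod_cast (by omega : (2:Int) ≤ K)),
      List.foldl_append, ih (by omega)]
    simpa using pv_stepB n K hK2 hKn

lemma pv_pref_zero : pvPref 0 = 0 := by
  unfold pvPref
  rw [Finset.sum_range_succ]
  simp

-- ===== VERDICT (by name: the statement is the Claim_ definition above) =====
theorem build_prefix_distinct_spec : Claim_equal_build_prefix_distinct := by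
  intro N _
  unfold Spec_build_prefix_distinct
  by_cases hN : N + 1 < 2
  · -- N + 1 ≤ 1: every loop range is empty, both return [0] * (N + 1)
    simp only [build_prefix_distinct, build_prefix_distinct_alt]
    rw [PySem.List.pyRange_one_eq_nil (by omega : N + 1 ≤ 2),
      PySem.List.pyRange_one_eq_nil (by omega : N + 1 ≤ 1)]
    rfl
  · have hpos : 0 ≤ N + 1 := by omega
    set n := (N + 1).toNat with hn
    have hn2 : 2 ≤ n := by omega
    have hcast : N + 1 = (n : Int) := by omega
    have hrepl : PySem.List.pyRepeat [(0 : Int)] (N + 1) = List.replicate n (0 : Int) := by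
      rw [PySem.List.pyRepeat_singleton, hn]
    simp only [build_prefix_distinct, build_prefix_distinct_alt]
    rw [hrepl, hcast]
    -- A's sieve result is the distinct-prime-factor counts
    rw [show List.replicate n (0 : Int) = (List.range n).map (pvFA 2) from
      pv_replicate_eq_map n (pvFA 2) (fun j _ => pv_fA_two j)]
    rw [pv_sieveA n n hn2 le_rfl]
    have hfA : (List.range n).map (pvFA n) = (List.range n).map pvOmega :=
      List.map_congr_left (fun j hj => pv_fA_final n j (List.mem_range.mp hj))
    rw [hfA]
    -- B's sieve result is the smallest-prime-factor table
    rw [show (List.range n).map (pvFA 2) = List.replicate n (0 : Int) from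
      (pv_replicate_eq_map n (pvFA 2) (fun j _ => pv_fA_two j)).symm]
    rw [show List.replicate n (0 : Int) = (List.range n).map (pvSB 2) from
      pv_replicate_eq_map n (pvSB 2) (fun j _ => pv_sB_two j)]
    rw [pv_sieveB n n hn2 le_rfl]
    have hspf : ∀ j : Nat, 2 ≤ j → j < n →
        PySem.List.pyGetD ((List.range n).map (pvSB n)) (j : Int) 0 = (j.minFac : Int) := by
      intro j h2j hjn
      rw [pv_getD_map, if_pos hjn]
      unfold pvSB
      rw [if_pos ⟨h2j, by
        have := Nat.minFac_le (by omega : 0 < j)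
        omega⟩]
    -- A's prefix loop
    rw [show (List.range n).map (pvSB 2) = List.replicate n (0 : Int) from
      (pv_replicate_eq_map n (pvSB 2) (fun j _ => pv_sB_two j)).symm]
    rw [show List.replicate n (0 : Int)
        = (List.range n).map (fun j => if j < 1 then pvPref j else 0) from
      pv_replicate_eq_map n _ (fun j _ => by
        by_cases h : j < 1
        · rw [if_pos h, show j = 0 by omega, pv_pref_zero]
        · rw [if_neg h])]
    rw [pv_prefA n ((List.range n).map pvOmega) rfl n (by omega) le_rfl]
    -- B's prefix loop
    rw [show (List.range n).map (fun j => if j < 1 then pvPref j else 0)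
        = List.replicate n (0 : Int) from
      (pv_replicate_eq_map n _ (fun j _ => by
        by_cases h : j < 1
        · rw [if_pos h, show j = 0 by omega, pv_pref_zero]
        · rw [if_neg h])).symm]
    rw [show List.replicate n (0 : Int)
        = (List.range n).map (fun j => if 2 ≤ j ∧ j < 2 then pvPref j else 0) from
      pv_replicate_eq_map n _ (fun j _ => by rw [if_neg (by omega)])]
    rw [pv_prefB n ((List.range n).map (pvSB n)) hspf n hn2 le_rfl]
    -- both are the prefix sums
    apply List.map_congr_left
    intro j hj
    by_cases h2j : 2 ≤ j
    · rw [if_pos (List.mem_range.mp hj), if_pos ⟨h2j, List.mem_range.mp hj⟩]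
    · rw [if_pos (List.mem_range.mp hj)]
      rw [if_neg (fun h => h2j h.1)]
      interval_cases j
      · exact pv_pref_zero
      · exact pv_pref_one
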